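-- pv_equiv track=rewrite | github.com/Hompeaz/DeerMes | src/deermes/tui.py | _wrap_prefixed
-- ===== SOURCE A (Python) =====
-- import unicodedata
--
-- def _wrap_prefixed(prefix: str, content: str, width: int) -> list[str]:
--     available = max(width - _text_cell_width(prefix) - 1, 10)
--     wrapped = _wrap_display_text(content or '', available, preserve_trailing=False)
--     if not wrapped:
--         return [f'{prefix} ']
--
--     lines: list[str] = []
--     indent = ' ' * _text_cell_width(prefix)
--     for index, line in enumerate(wrapped):
--         leader = prefix if index == 0 else indent
--         lines.append(f'{leader} {line}')
--     return lines
--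
-- def _wrap_display_text(text: str, width: int, preserve_trailing: bool) -> list[str]:
--     width = max(width, 1)
--     lines: list[str] = []
--     current = ''
--     current_width = 0
--
--     for char in text:
--         if char == '\n':
--             lines.append(current if preserve_trailing else current.rstrip())
--             current = ''
--             current_width = 0
--             continue
--
--         chunk = '    ' if char == '\t' else char
--         for item in chunk:
--             item_width = _char_cell_width(item)
--             if current and current_width + item_width > width:
--                 lines.append(current if preserve_trailing else current.rstrip())
--                 current = ''
--                 current_width = 0
--             current += item
--             current_width += item_width
--
--     if current or not lines:
--         lines.append(current if preserve_trailing else current.rstrip())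
--     return lines
--
-- def _text_cell_width(text: str) -> int:
--     return sum(_char_cell_width(char) for char in text)
--
-- def _char_cell_width(char: str) -> int:
--     if char == '\t':
--         return 4
--     if char in {'\n', '\r'}:
--         return 0
--     if unicodedata.combining(char):
--         return 0
--     return 2 if unicodedata.east_asian_width(char) in {'W', 'F'} else 1
-- ===== SOURCE B (Python) =====
-- import unicodedata
--
-- def _char_cell_width(char: str) -> int:
--     if char == '\t':
--         return 4
--     if char in ('\n', '\r'):
--         return 0
--     if unicodedata.combining(char):
--         return 0
--     return 2 if unicodedata.east_asian_width(char) in {'W', 'F'} else 1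
--
-- def _split_wrap(text: str, width: int) -> list[str]:
--     width = max(width, 1)
--     out: list[str] = []
--     segments = text.split('\n')
--     last = len(segments) - 1
--     for i, seg in enumerate(segments):
--         expanded = ''.join('    ' if ch == '\t' else ch for ch in seg)
--         pieces: list[str] = []
--         cur = ''
--         cur_width = 0
--         for ch in expanded:
--             w = _char_cell_width(ch)
--             if cur and cur_width + w > width:
--                 pieces.append(cur)
--                 cur, cur_width = '', 0
--             cur += ch
--             cur_width += w
--         if cur:
--             pieces.append(cur)
--         if i < last and not pieces:
--             pieces = ['']
--         out.extend(p.rstrip() for p in pieces)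
--     if not out:
--         out.append('')
--     return out
--
-- def _wrap_prefixed(prefix: str, content: str, width: int) -> list[str]:
--     pw = sum(map(_char_cell_width, prefix))
--     available = max(width - pw - 1, 10)
--     wrapped = _split_wrap(content, available)
--     indent = ' ' * pw
--     return [prefix + ' ' + wrapped[0]] + [indent + ' ' + line for line in wrapped[1:]]
-- ===== Notes on version B (the rewrite author's own statement) =====
-- stated objective: alternative
-- what changed: B splits the content on '\n' first and wraps each segment independently (tabs expanded up front, rstrip applied in bulk at the end, prefix/indent lines built by list construction), instead of A's single character loop that interleaves newline handling, tab expansion, flushing and rstrip in one stateful pass.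
import Mathlib
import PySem

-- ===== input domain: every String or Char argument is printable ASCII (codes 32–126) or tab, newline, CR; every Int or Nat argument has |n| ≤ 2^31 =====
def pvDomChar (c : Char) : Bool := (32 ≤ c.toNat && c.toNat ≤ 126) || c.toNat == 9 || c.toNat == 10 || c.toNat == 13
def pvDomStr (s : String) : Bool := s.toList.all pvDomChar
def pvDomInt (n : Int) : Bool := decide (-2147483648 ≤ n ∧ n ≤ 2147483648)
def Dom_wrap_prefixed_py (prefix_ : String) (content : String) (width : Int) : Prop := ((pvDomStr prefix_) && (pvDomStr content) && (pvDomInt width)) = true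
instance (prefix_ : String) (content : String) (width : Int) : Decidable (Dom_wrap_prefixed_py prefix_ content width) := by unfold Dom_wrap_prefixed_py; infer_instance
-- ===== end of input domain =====

-- B re-implements _wrap_prefixed by splitting on '\n' first and wrapping each segment on its own
-- (bulk rstrip at the end) instead of A's single char loop with inline newline/flush state; same
-- return value on the whole domain (objective: alternative decomposition, no speed claim).

-- ===== PORT A =====
-- port of _char_cell_width, used by both Pythons; exact on Dom (printable ASCII has no wide or combining characters)
def cellW (c : Char) : Int := if c = '\t' then 4 else if c = '\n' ∨ c = '\r' then 0 else 1

-- port of _text_cell_width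
def textW (s : String) : Int := (s.toList.map cellW).sum

-- `current if preserve_trailing else current.rstrip()` (current kept as List Char, made a String when emitted)
def finA (preserve : Bool) (cur : List Char) : String :=
  if preserve then String.ofList cur else String.ofList (PySem.Chars.rstrip cur)

-- body of `for item in chunk:` — state (lines, current, current_width)
def stepItemA (w : Int) (preserve : Bool) (st : List String × List Char × Int) (item : Char) :
    List String × List Char × Int :=
  if st.2.1 ≠ [] ∧ st.2.2 + cellW item > w then
    (st.1 ++ [finA preserve st.2.1], [item], cellW item)
  else
    (st.1, st.2.1 ++ [item], st.2.2 + cellW item)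

-- body of `for char in text:`
def stepCharA (w : Int) (preserve : Bool) (st : List String × List Char × Int) (c : Char) :
    List String × List Char × Int :=
  if c = '\n' then (st.1 ++ [finA preserve st.2.1], [], 0)
  else (if c = '\t' then [' ', ' ', ' ', ' '] else [c]).foldl (stepItemA w preserve) st

-- port of _wrap_display_text
def wrapDisplayTextA (text : String) (width : Int) (preserve : Bool) : List String :=
  let w := max width 1
  let st := text.toList.foldl (stepCharA w preserve) ([], [], 0)
  if st.2.1 ≠ [] ∨ st.1 = [] then st.1 ++ [finA preserve st.2.1] else st.1

-- port of _wrap_prefixed (`content or ''` is `content` for a str)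
def wrap_prefixed_py (prefix_ : String) (content : String) (width : Int) : List String :=
  let available := max (width - textW prefix_ - 1) 10
  let wrapped := wrapDisplayTextA content available false
  if wrapped = [] then [prefix_ ++ " "]
  else
    let indent := String.ofList (PySem.List.pyRepeat [' '] (textW prefix_))
    (PySem.List.enumerate wrapped).foldl
      (fun lines p => lines ++ [(if p.1 = 0 then prefix_ else indent) ++ " " ++ p.2]) []

-- ===== PORT B =====
-- `''.join('    ' if ch == '\t' else ch for ch in seg)`
def expandTabsB (seg : List Char) : List Char :=
  seg.flatMap (fun ch => if ch = '\t' then [' ', ' ', ' ', ' '] else [ch])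

-- body of `for ch in expanded:` — state (pieces, cur, cur_width); pieces kept raw, rstrip applied later
def stepB (w : Int) (st : List (List Char) × List Char × Int) (ch : Char) :
    List (List Char) × List Char × Int :=
  if st.2.1 ≠ [] ∧ st.2.2 + cellW ch > w then (st.1 ++ [st.2.1], [ch], cellW ch)
  else (st.1, st.2.1 ++ [ch], st.2.2 + cellW ch)

-- one segment's greedy pieces (before the non-final empty-segment fix and the rstrip)
def wrapSegB (w : Int) (seg : List Char) : List (List Char) :=
  let st := (expandTabsB seg).foldl (stepB w) ([], [], 0)
  if st.2.1 ≠ [] then st.1 ++ [st.2.1] else st.1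

-- port of _split_wrap
def splitWrapB (text : String) (width : Int) : List String :=
  let w := max width 1
  let segments := PySem.Chars.splitOn text.toList ['\n']
  let last : Int := (segments.length : Int) - 1
  let out := (PySem.List.enumerate segments).foldl
    (fun out p =>
      let pieces := wrapSegB w p.2
      let pieces := if p.1 < last ∧ pieces = [] then [[]] else pieces
      out ++ pieces.map (fun q => String.ofList (PySem.Chars.rstrip q))) []
  if out = [] then out ++ [""] else out

-- port of B's _wrap_prefixed; the [] branch is unreachable (splitWrapB never returns [],
-- where Python's wrapped[0] would raise)
def wrap_prefixed_py_alt (prefix_ : String) (content : String) (width : Int) : List String :=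
  let pw := (prefix_.toList.map cellW).sum
  let available := max (width - pw - 1) 10
  let wrapped := splitWrapB content available
  let indent := String.ofList (PySem.List.pyRepeat [' '] pw)
  match wrapped with
  | [] => []
  | first :: rest => (prefix_ ++ " " ++ first) :: rest.map (fun line => indent ++ " " ++ line)

-- ===== PRECONDITION & SPEC =====
def Spec_wrap_prefixed_py (prefix_ : String) (content : String) (width : Int) (out : List String) : Prop := out = wrap_prefixed_py_alt prefix_ content width
instance (prefix_ : String) (content : String) (width : Int) (out : List String) : Decidable (Spec_wrap_prefixed_py prefix_ content width out) := by unfold Spec_wrap_prefixed_py; infer_instance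

-- ===== CLAIM (what is proved, stated in full; the proofs are below) =====
def Claim_equal_wrap_prefixed_py : Prop := ∀ (prefix_ : String) (content : String) (width : Int), Dom_wrap_prefixed_py prefix_ content width → Spec_wrap_prefixed_py prefix_ content width (wrap_prefixed_py prefix_ content width)

-- ===== LEMMAS AND PROOFS =====

-- rstrip-then-mk, the shape both sides emit lines in
def finR (cur : List Char) : String := String.ofList (PySem.Chars.rstrip cur)

-- Python's text.split('\n') as a structural recursion
def split1 : List Char → List (List Char)
  | [] => [[]]
  | c :: r => if c = '\n' then [] :: split1 r else (split1 r).modifyHead (c :: ·)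

-- the finished lines B produces for a list of segments (last segment treated specially)
def Gout (w : Int) : List (List Char) → List String
  | [] => []
  | [s] => (wrapSegB w s).map finR
  | s :: s2 :: rest =>
      (if wrapSegB w s = [] then [[]] else wrapSegB w s).map finR ++ Gout w (s2 :: rest)

theorem foldl_stepB_cur_ne {w : Int} : ∀ (l : List Char) (st : List (List Char) × List Char × Int),
    (l.foldl (stepB w) st).2.1 = [] → l = [] ∧ st.2.1 = [] := by
  intro l
  induction l with
  | nil => intro st h; exact ⟨rfl, h⟩
  | cons c cs ih =>
    intro st h
    rcases ih _ h with ⟨_, h2⟩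
    exfalso
    revert h2
    unfold stepB
    split <;> simp

theorem foldl_stepB_nil {w : Int} (l : List Char) (st : List (List Char) × List Char × Int)
    (h : (l.foldl (stepB w) st).2.1 = []) : l.foldl (stepB w) st = st := by
  rcases foldl_stepB_cur_ne l st h with ⟨h1, _⟩
  subst h1; rfl

theorem foldl_item_rel (w : Int) : ∀ (l : List Char) (base : List String)
    (p : List (List Char)) (cur : List Char) (cw : Int),
    l.foldl (stepItemA w false) (base ++ p.map finR, cur, cw) =
      (base ++ ((l.foldl (stepB w) (p, cur, cw)).1).map finR,
       (l.foldl (stepB w) (p, cur, cw)).2.1,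
       (l.foldl (stepB w) (p, cur, cw)).2.2) := by
  intro l
  induction l with
  | nil => intro base p cur cw; rfl
  | cons c cs ih =>
    intro base p cur cw
    simp only [List.foldl_cons, stepItemA, stepB]
    by_cases hc : cur ≠ [] ∧ cw + cellW c > w
    · rw [if_pos hc, if_pos hc]
      have : base ++ p.map finR ++ [finA false cur] = base ++ ((p ++ [cur]).map finR) := by
        simp [finA, finR]
      rw [this, ih base (p ++ [cur]) [c] (cellW c)]
    · rw [if_neg hc, if_neg hc]
      exact ih base p (cur ++ [c]) (cw + cellW c)

theorem foldl_char_expand (w : Int) : ∀ (l : List Char), '\n' ∉ l →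
    ∀ (st : List String × List Char × Int),
    l.foldl (stepCharA w false) st = (expandTabsB l).foldl (stepItemA w false) st := by
  intro l
  induction l with
  | nil => intro _ st; rfl
  | cons c cs ih =>
    intro hnl st
    have hc : c ≠ '\n' := fun h => hnl (h ▸ List.mem_cons_self ..)
    have hcs : '\n' ∉ cs := fun h => hnl (List.mem_cons_of_mem _ h)
    simp only [List.foldl_cons, expandTabsB, List.flatMap_cons, List.foldl_append]
    rw [show stepCharA w false st c
        = (if c = '\t' then [' ', ' ', ' ', ' '] else [c]).foldl (stepItemA w false) st from by
      simp [stepCharA, hc]]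
    exact ih hcs _

theorem split1_ne_nil : ∀ (cs : List Char), split1 cs ≠ [] := by
  intro cs
  induction cs with
  | nil => simp [split1]
  | cons c r ih =>
    simp only [split1]
    split
    · simp
    · cases h : split1 r with
      | nil => exact absurd h ih
      | cons a t => simp

theorem mem_split1_no_nl : ∀ (cs : List Char) (s : List Char), s ∈ split1 cs → '\n' ∉ s := by
  intro cs
  induction cs with
  | nil => intro s hs; simp [split1] at hs; simp [hs]
  | cons c r ih =>
    intro s hs
    by_cases hc : c = '\n'
    · simp only [split1, if_pos hc] at hs
      rcases List.mem_cons.mp hs with h | h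
      · simp [h]
      · exact ih s h
    · simp only [split1, if_neg hc] at hs
      cases h : split1 r with
      | nil => exact absurd h (split1_ne_nil r)
      | cons a t =>
        rw [h, List.modifyHead_cons] at hs
        rcases List.mem_cons.mp hs with h2 | h2
        · subst h2
          intro hmem
          rcases List.mem_cons.mp hmem with h3 | h3
          · exact hc h3.symm
          · exact ih a (h ▸ List.mem_cons_self ..) h3
        · exact ih s (h ▸ List.mem_cons_of_mem _ h2)

theorem intercalate_cons2 (sep x y : List Char) (t : List (List Char)) :
    List.intercalate sep (x :: y :: t) = x ++ sep ++ List.intercalate sep (y :: t) := by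
  simp [List.intercalate, List.intersperse]

theorem join_split1 : ∀ (cs : List Char), List.intercalate ['\n'] (split1 cs) = cs := by
  intro cs
  induction cs with
  | nil => simp [split1, List.intercalate]
  | cons c r ih =>
    by_cases hc : c = '\n'
    · subst hc
      rw [show split1 ('\n' :: r) = [] :: split1 r from by simp [split1]]
      cases h : split1 r with
      | nil => exact absurd h (split1_ne_nil r)
      | cons a t =>
        rw [intercalate_cons2]
        rw [h] at ih
        simpa using ih
    · rw [show split1 (c :: r) = (split1 r).modifyHead (c :: ·) from by simp [split1, hc]]
      cases h : split1 r with
      | nil => exact absurd h (split1_ne_nil r)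
      | cons a t =>
        rw [List.modifyHead_cons]
        rw [h] at ih
        cases t with
        | nil => simp only [List.intercalate] at ih ⊢; simp at ih ⊢; rw [ih]
        | cons b t2 =>
          rw [intercalate_cons2] at ih ⊢
          simp [← ih]

theorem splitOn_go_nl : ∀ (fuel : Nat) (l cur : List Char) (acc : List (List Char)),
    l.length < fuel →
    PySem.Chars.splitOn.go ['\n'] fuel l cur acc
      = acc.reverse ++ (split1 l).modifyHead (cur.reverse ++ ·) := by
  intro fuel
  induction fuel with
  | zero => intro l cur acc h; omega
  | succ fuel ih =>
    intro l cur acc h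
    cases l with
    | nil =>
      simp [PySem.Chars.splitOn.go, split1]
    | cons c rest =>
      by_cases hc : c = '\n'
      · subst hc
        rw [show PySem.Chars.splitOn.go ['\n'] (fuel + 1) ('\n' :: rest) cur acc
            = PySem.Chars.splitOn.go ['\n'] fuel rest [] (cur.reverse :: acc) from by
          simp [PySem.Chars.splitOn.go, List.isPrefixOf]]
        rw [ih rest [] (cur.reverse :: acc) (by simp at h; omega)]
        rw [show split1 ('\n' :: rest) = [] :: split1 rest from by simp [split1]]
        cases hs : split1 rest with
        | nil => exact absurd hs (split1_ne_nil rest)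
        | cons a t => simp
      · rw [show PySem.Chars.splitOn.go ['\n'] (fuel + 1) (c :: rest) cur acc
            = PySem.Chars.splitOn.go ['\n'] fuel rest (c :: cur) acc from by
          simp [PySem.Chars.splitOn.go, List.isPrefixOf]
          exact fun h2 => absurd h2.symm hc]
        rw [ih rest (c :: cur) acc (by simp at h; omega)]
        rw [show split1 (c :: rest) = (split1 rest).modifyHead (c :: ·) from by simp [split1, hc]]
        cases hs : split1 rest with
        | nil => exact absurd hs (split1_ne_nil rest)
        | cons a t => simp

theorem splitOn_nl (cs : List Char) : PySem.Chars.splitOn cs ['\n'] = split1 cs := by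
  rw [show PySem.Chars.splitOn cs ['\n']
      = PySem.Chars.splitOn.go ['\n'] (cs.length + 1) cs [] [] from rfl]
  rw [splitOn_go_nl (cs.length + 1) cs [] [] (by omega)]
  cases hs : split1 cs with
  | nil => exact absurd hs (split1_ne_nil cs)
  | cons a t => simp

theorem A_main (w : Int) : ∀ (segs : List (List Char)), segs ≠ [] → (∀ s ∈ segs, '\n' ∉ s) →
    ∀ (acc : List String),
    (let st := (List.intercalate ['\n'] segs).foldl (stepCharA w false) (acc, [], 0)
     if st.2.1 ≠ [] ∨ st.1 = [] then st.1 ++ [finA false st.2.1] else st.1)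
    = if acc = [] ∧ Gout w segs = [] then acc ++ [""] else acc ++ Gout w segs := by
  intro segs
  induction segs with
  | nil => intro h _ _; exact absurd rfl h
  | cons s rest ih =>
    intro _ hnl acc
    cases rest with
    | nil =>
      rw [show List.intercalate ['\n'] [s] = s from by simp [List.intercalate]]
      simp only []
      rw [foldl_char_expand w s (hnl s (List.mem_cons_self ..)),
          show ((acc, ([] : List Char), (0 : Int)) : List String × List Char × Int)
            = (acc ++ ([] : List (List Char)).map finR, [], 0) from by simp,
          foldl_item_rel w _ acc [] [] 0]
      by_cases hcur : ((expandTabsB s).foldl (stepB w) ([], [], 0)).2.1 = []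
      · have hst := foldl_stepB_nil (w := w) (expandTabsB s) ([], [], 0) hcur
        have hws : wrapSegB w s = [] := by simp [wrapSegB, hst]
        rw [hst]
        by_cases hacc : acc = [] <;>
          simp [Gout, hws, hacc, finA, PySem.Chars.rstrip]
      · have hws : wrapSegB w s
            = ((expandTabsB s).foldl (stepB w) ([], [], 0)).1
              ++ [((expandTabsB s).foldl (stepB w) ([], [], 0)).2.1] := by
          simp [wrapSegB, hcur]
        simp [Gout, hws, hcur, finA, finR]
    | cons s2 rest2 =>
      rw [intercalate_cons2, List.foldl_append, List.foldl_append]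
      simp only []
      rw [foldl_char_expand w s (hnl s (List.mem_cons_self ..)),
          show ((acc, ([] : List Char), (0 : Int)) : List String × List Char × Int)
            = (acc ++ ([] : List (List Char)).map finR, [], 0) from by simp,
          foldl_item_rel w _ acc [] [] 0,
          List.foldl_cons, List.foldl_nil]
      rw [show ∀ st : List String × List Char × Int, stepCharA w false st '\n'
          = (st.1 ++ [finA false st.2.1], [], 0) from fun st => by simp [stepCharA]]
      rw [ih (by simp) (fun t ht => hnl t (List.mem_cons_of_mem _ ht)) _]
      rw [if_neg (by rintro ⟨h1, _⟩; simp at h1)]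
      by_cases hcur : ((expandTabsB s).foldl (stepB w) ([], [], 0)).2.1 = []
      · have hst := foldl_stepB_nil (w := w) (expandTabsB s) ([], [], 0) hcur
        have hws : wrapSegB w s = [] := by simp [wrapSegB, hst]
        rw [hst]
        simp [Gout, hws, finA, finR]
      · have hws : wrapSegB w s
            = ((expandTabsB s).foldl (stepB w) ([], [], 0)).1
              ++ [((expandTabsB s).foldl (stepB w) ([], [], 0)).2.1] := by
          simp [wrapSegB, hcur]
        have hwne : wrapSegB w s ≠ [] := by rw [hws]; simp
        simp only [Gout]
        rw [if_neg hwne, if_neg (by rintro ⟨_, h2⟩; rw [hws] at h2; simp at h2)]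
        simp [hws, finA, finR]

theorem B_out (w last : Int) : ∀ (segs : List (List Char)) (start : Int) (acc : List String),
    segs ≠ [] → start + segs.length = last + 1 →
    (PySem.List.enumerate segs start).foldl
      (fun out p =>
        out ++ (if p.1 < last ∧ wrapSegB w p.2 = [] then [[]] else wrapSegB w p.2).map
          (fun q => String.ofList (PySem.Chars.rstrip q))) acc
    = acc ++ Gout w segs := by
  intro segs
  induction segs with
  | nil => intro start acc h _; exact absurd rfl h
  | cons seg rest ih =>
    intro start acc _ hlen
    cases rest with
    | nil =>
      have hstart : ¬ (start < last) := by simp at hlen; omega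
      rw [PySem.List.enumerate_cons, List.foldl_cons, PySem.List.enumerate_nil, List.foldl_nil]
      simp [hstart, Gout, finR]
    | cons seg2 rest2 =>
      have hstart : start < last := by simp at hlen; omega
      rw [PySem.List.enumerate_cons, List.foldl_cons]
      rw [ih (start + 1) _ (by simp) (by simp at hlen ⊢; omega)]
      have hcontrib : (if start < last ∧ wrapSegB w seg = [] then [[]] else wrapSegB w seg)
          = (if wrapSegB w seg = [] then [[]] else wrapSegB w seg) := by
        by_cases hp : wrapSegB w seg = [] <;> simp [hp, hstart]
      rw [hcontrib]
      simp [Gout, finR]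

theorem wrap_display_eq (content : String) (width : Int) :
    wrapDisplayTextA content width false = splitWrapB content width := by
  simp only [wrapDisplayTextA, splitWrapB]
  rw [splitOn_nl]
  rw [B_out (max width 1) ((split1 content.toList).length - 1) (split1 content.toList) 0 []
      (split1_ne_nil _) (by omega)]
  have h := A_main (max width 1) (split1 content.toList) (split1_ne_nil _)
      (mem_split1_no_nl content.toList) []
  rw [join_split1] at h
  simp only [] at h ⊢
  rw [h]
  by_cases hg : Gout (max width 1) (split1 content.toList) = [] <;> simp [hg]

theorem splitWrapB_ne_nil (content : String) (width : Int) : splitWrapB content width ≠ [] := by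
  simp only [splitWrapB]
  split
  · simp
  · assumption

theorem prefix_fold (pfx ind : String) : ∀ (rest : List String) (i : Int) (acc : List String),
    1 ≤ i →
    (PySem.List.enumerate rest i).foldl
      (fun lines p => lines ++ [(if p.1 = 0 then pfx else ind) ++ " " ++ p.2]) acc
    = acc ++ rest.map (fun line => ind ++ " " ++ line) := by
  intro rest
  induction rest with
  | nil => intro i acc _; simp [PySem.List.enumerate]
  | cons x xs ih =>
    intro i acc hi
    rw [PySem.List.enumerate_cons, List.foldl_cons, if_neg (by omega : ¬ (i = 0))]
    rw [ih (i + 1) _ (by omega)]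
    simp

-- ===== VERDICT (by name: the statement is the Claim_ definition above) =====
theorem wrap_prefixed_py_spec : Claim_equal_wrap_prefixed_py := by
  intro prefix_ content width _
  unfold Spec_wrap_prefixed_py wrap_prefixed_py wrap_prefixed_py_alt
  have hpw : textW prefix_ = (prefix_.toList.map cellW).sum := rfl
  simp only [hpw, wrap_display_eq]
  set available := max (width - (prefix_.toList.map cellW).sum - 1) 10 with havail
  cases h : splitWrapB content available with
  | nil => exact absurd h (splitWrapB_ne_nil content available)
  | cons first rest =>
    have hne : (first :: rest : List String) ≠ [] := by simp
    simp only [if_neg hne, PySem.List.enumerate_cons, List.foldl_cons]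
    rw [show (0:Int)+1 = 1 from rfl, prefix_fold _ _ rest 1 _ (by omega)]
    simp
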